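-- pv_equiv track=rewrite | github.com/TotallyReal/mapping_field | mapping_field/field.py | batch_pow
-- ===== SOURCE A (Python) =====
-- import math
--
-- def batch_pow(x, powers: list[int]):
--     """
--     Compute simultanously several powers of the same number x.
--     """
--     max_power = max(powers)
--     results = [1 for _ in powers]
--     if max_power == 0:
--         return results
--     n_bits = int(math.log2(max_power)) + 1
--     for i in range(n_bits):
--         mask = 1 << i
--         for j in range(len(powers)):
--             if powers[j] & mask:
--                 results[j] *= x
--         x *= x
--     return results
-- ===== SOURCE B (Python) =====
-- def batch_pow(x, powers: list[int]):
--     """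
--     Compute several powers of the same number x.
--
--     Power-major: each entry is computed independently by a recursive
--     binary-exponentiation helper that shifts the exponent right one bit
--     per step, for bit_length(max(powers)) steps.
--     """
--     n_bits = max(powers).bit_length()
--
--     def one(p, b, acc, n):
--         if n == 0:
--             return acc
--         return one(p >> 1, b * b, acc * b if p & 1 else acc, n - 1)
--
--     return [one(p, x, 1, n_bits) for p in powers]
-- ===== Notes on version B (the rewrite author's own statement) =====
-- stated objective: alternative
-- what changed: B replaces A's bit-major pass (one shared squaring chain updating a mutable results array once per bit) with a power-major list comprehension: each entry is computed independently by a recursive binary-exponentiation helper that shifts its own copy of the exponent right each step, with no shared mutable state.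
import Mathlib
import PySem

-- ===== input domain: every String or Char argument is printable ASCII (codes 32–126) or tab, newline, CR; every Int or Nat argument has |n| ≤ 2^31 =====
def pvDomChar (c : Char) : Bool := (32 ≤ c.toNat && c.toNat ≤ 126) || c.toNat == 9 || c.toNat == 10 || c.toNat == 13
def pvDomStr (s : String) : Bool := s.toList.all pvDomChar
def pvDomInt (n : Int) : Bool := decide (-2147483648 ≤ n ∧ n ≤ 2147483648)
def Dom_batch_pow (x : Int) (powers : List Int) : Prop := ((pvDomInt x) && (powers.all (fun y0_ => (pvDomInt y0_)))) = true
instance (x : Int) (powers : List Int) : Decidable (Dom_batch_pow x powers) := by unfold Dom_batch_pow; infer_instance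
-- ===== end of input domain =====

-- B is power-major: each entry is computed independently by a recursive binary-exponentiation
-- helper that shifts its own exponent right each step, instead of A's bit-major pass sharing
-- one squaring chain across a mutable results array; same cost class ('alternative').

-- ===== PORT A =====
def batch_pow (x : Int) (powers : List Int) : List Int :=
  match PySem.List.max? powers (fun y => y) with
  | none => []  -- max([]) raises ValueError; excluded by Pre_
  | some max_power =>
    if max_power = 0 then powers.map (fun _ => (1 : Int))
    else if max_power < 0 then []  -- math.log2(negative) raises ValueError; excluded by Pre_
    else
      -- n_bits = int(math.log2(max_power)) + 1, exact as Nat.log2 + 1 for 1 ≤ max_power ≤ 2^31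
      (((List.range (Nat.log2 max_power.toNat + 1)).foldl
        (fun (st : List Int × Int) (i : Nat) =>
          -- inner loop: results[j] *= x when powers[j] & mask, elementwise over the results list
          ((powers.zip st.1).map
            (fun pr => if PySem.Int.band pr.1 ((1 : Int) <<< i) ≠ 0 then pr.2 * st.2 else pr.2),
           st.2 * st.2))
        (powers.map (fun _ => (1 : Int)), x))).1

-- ===== PORT B =====
-- recursive helper `one(p, b, acc, n)` from Source B
def bpOne (p b acc : Int) : Nat → Int
  | 0 => acc
  | n + 1 => bpOne (p >>> 1) (b * b) (if PySem.Int.band p 1 ≠ 0 then acc * b else acc) n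

def batch_pow_alt (x : Int) (powers : List Int) : List Int :=
  match PySem.List.max? powers (fun y => y) with
  | none => []  -- max([]) raises ValueError; excluded by Pre_
  | some m => powers.map (fun p => bpOne p x 1 (PySem.Int.bitLength m))

-- ===== PRECONDITION & SPEC =====
-- Pre_ excludes exactly the inputs on which A raises ValueError: the empty list (max([]))
-- and lists whose maximum is negative (math.log2 of a negative number).
def Pre_batch_pow (x : Int) (powers : List Int) : Prop := ∃ p ∈ powers, 0 ≤ p
instance (x : Int) (powers : List Int) : Decidable (Pre_batch_pow x powers) := by unfold Pre_batch_pow; infer_instance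
def pvWitness_batch_pow : Int × List Int := (3, [5, 0, 2])
def Spec_batch_pow (x : Int) (powers : List Int) (out : List Int) : Prop := out = batch_pow_alt x powers
instance (x : Int) (powers : List Int) (out : List Int) : Decidable (Spec_batch_pow x powers out) := by unfold Spec_batch_pow; infer_instance

-- ===== CLAIM (what is proved, stated in full; the proofs are below) =====
def Claim_equal_batch_pow : Prop := ∀ (x : Int) (powers : List Int), Dom_batch_pow x powers → Pre_batch_pow x powers → Spec_batch_pow x powers (batch_pow x powers)

-- ===== LEMMAS AND PROOFS =====

-- Python's `p & (1 << i)` is truthy iff `(p >> i) & 1` is (bit i of p, two's complement).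
lemma cond_equiv (p : Int) (i : Nat) :
    (PySem.Int.band p ((1 : Int) <<< i) ≠ 0) ↔ (PySem.Int.band (p >>> i) 1 ≠ 0) := by
  have hs : ((1 : Int) <<< i) = ((2 ^ i : Nat) : Int) := by
    show Int.ofNat (1 <<< i) = Int.ofNat (2 ^ i)
    rw [Nat.shiftLeft_eq, one_mul]
  have h2p : 0 < 2 ^ i := Nat.two_pow_pos i
  cases p with
  | ofNat n =>
    rw [hs, show (Int.ofNat n) >>> i = Int.ofNat (n >>> i) from rfl]
    simp only [Int.ofNat_eq_natCast, PySem.Int.band_natCast, show ((1:Int)) = ((1:Nat):Int) from rfl]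
    norm_cast
    rw [Nat.and_two_pow, Nat.and_one_is_mod, Nat.shiftRight_eq_div_pow,
      Nat.testBit_eq_decide_div_mod_eq]
    rcases Nat.mod_two_eq_zero_or_one (n / 2 ^ i) with h | h <;> simp [h]
  | negSucc n =>
    rw [hs, show (Int.negSucc n) >>> i = Int.negSucc (n >>> i) from rfl]
    have hL : PySem.Int.band (Int.negSucc n) ((2 ^ i : Nat) : Int)
        = ((2 ^ i - (2 ^ i &&& n) : Nat) : Int) := by
      simp only [PySem.Int.band]
      rw [if_neg (by omega), if_pos (Int.natCast_nonneg _)]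
      have t1 : (((2 ^ i : Nat) : Int)).toNat = 2 ^ i := Int.toNat_natCast _
      have t2 : (-Int.negSucc n - 1).toNat = n := by omega
      rw [t1, t2]
    have hR' : ∀ k : Nat, PySem.Int.band (Int.negSucc k) 1 = ((1 - (1 &&& k) : Nat) : Int) := by
      intro k
      simp only [PySem.Int.band]
      rw [if_neg (by omega), if_pos (by omega)]
      have t1 : ((1 : Int)).toNat = 1 := rfl
      have t2 : (-Int.negSucc k - 1).toNat = k := by omega
      rw [t1, t2]
    have hR := hR' (n >>> i)
    have HL : (2 ^ i - (2 ^ i &&& n) ≠ 0) ↔ ¬ n.testBit i := by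
      rw [Nat.two_pow_and]
      cases hb : n.testBit i <;> simp
    have HR : (1 - (1 &&& (n >>> i)) ≠ 0) ↔ ¬ n.testBit i := by
      rw [Nat.one_and_eq_mod_two, Nat.shiftRight_eq_div_pow, Nat.testBit_eq_decide_div_mod_eq]
      rcases Nat.mod_two_eq_zero_or_one (n / 2 ^ i) with h | h <;> simp [h]
    rw [hL, hR]
    simp only [ne_eq, Int.natCast_eq_zero]
    exact HL.trans HR.symm

-- n_bits agreement: int(math.log2(m)) + 1 = m.bit_length() for m ≥ 1.
lemma nbits_eq (m : Int) (hm : 0 < m) : Nat.log2 m.toNat + 1 = PySem.Int.bitLength m := by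
  have hne0 : m ≠ 0 := by omega
  have h1 := PySem.Int.lt_two_pow_bitLength m
  have h2 := PySem.Int.two_pow_bitLength_le m hne0
  have hNat : m.natAbs = m.toNat := by omega
  have hn0 : m.toNat ≠ 0 := by omega
  have hkpos : 1 ≤ PySem.Int.bitLength m := by
    rcases Nat.eq_zero_or_pos (PySem.Int.bitLength m) with hk | hk
    · rw [hk] at h1; simp at h1; omega
    · exact hk
  have ha : Nat.log2 m.toNat < PySem.Int.bitLength m :=
    (Nat.log2_lt hn0).mpr (by rw [← hNat]; exact h1)
  have hb : PySem.Int.bitLength m - 1 ≤ Nat.log2 m.toNat :=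
    (Nat.le_log2 hn0).mpr (by rw [← hNat]; exact h2)
  omega

-- arithmetic right shift composes: p >> (i+1) = (p >> 1) >> i
lemma shiftRight_succ' (p : Int) (i : Nat) : p >>> (i + 1) = (p >>> 1) >>> i := by
  cases p with
  | ofNat n =>
    show Int.ofNat (n >>> (i + 1)) = Int.ofNat ((n >>> 1) >>> i)
    rw [Nat.add_comm i 1, Nat.shiftRight_add]
  | negSucc n =>
    show Int.negSucc (n >>> (i + 1)) = Int.negSucc ((n >>> 1) >>> i)
    rw [Nat.add_comm i 1, Nat.shiftRight_add]

-- B's recursive helper equals the index-form per-power fold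
lemma bpOne_eq_fold (n : Nat) : ∀ (p b acc : Int),
    bpOne p b acc n
      = (((List.range n).foldl
          (fun (st : Int × Int) (i : Nat) =>
            (if PySem.Int.band (p >>> i) 1 ≠ 0 then st.1 * st.2 else st.1, st.2 * st.2))
          (acc, b))).1 := by
  induction n with
  | zero => intro p b acc; rfl
  | succ n ih =>
    intro p b acc
    rw [bpOne, ih, List.range_succ_eq_map, List.foldl_cons, List.foldl_map]
    have h0 : p >>> (0 : Nat) = p := by
      cases p <;> simp [Int.shiftRight_eq, Int.shiftRight]
    simp only [h0, Nat.succ_eq_add_one, shiftRight_succ']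

-- the shared squaring chain
def sqChain (x : Int) (n : Nat) : Int := (List.range n).foldl (fun b _ => b * b) x

lemma sqChain_succ (x : Int) (n : Nat) : sqChain x (n + 1) = sqChain x n * sqChain x n := by
  simp [sqChain, List.range_succ]

-- the per-power index-form fold's second component is the squaring chain, independent of p
lemma pfold_snd (x p : Int) (n : Nat) :
    (((List.range n).foldl
      (fun (st : Int × Int) (i : Nat) =>
        (if PySem.Int.band (p >>> i) 1 ≠ 0 then st.1 * st.2 else st.1, st.2 * st.2))
      (1, x))).2 = sqChain x n := by
  induction n with
  | zero => rfl
  | succ n ih =>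
    rw [List.range_succ, List.foldl_append]
    dsimp only [List.foldl_cons, List.foldl_nil]
    rw [sqChain_succ, ih]

lemma zip_map_ite (l : List Int) (f : Int → Int) (c : Int) (n : Nat) :
    (l.zip (l.map f)).map
      (fun pr => if PySem.Int.band pr.1 ((1 : Int) <<< n) ≠ 0 then pr.2 * c else pr.2)
    = l.map (fun (p : Int) => if PySem.Int.band p ((1 : Int) <<< n) ≠ 0 then f p * c else f p) := by
  induction l with
  | nil => rfl
  | cons a t ih => simpa using ih

-- loop interchange: A's bit-major fold equals the map of per-power index-form folds
lemma swap_loops (x : Int) (powers : List Int) (n : Nat) :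
    ((List.range n).foldl
      (fun (st : List Int × Int) (i : Nat) =>
        ((powers.zip st.1).map
          (fun pr => if PySem.Int.band pr.1 ((1 : Int) <<< i) ≠ 0 then pr.2 * st.2 else pr.2),
         st.2 * st.2))
      (powers.map (fun _ => (1 : Int)), x))
    = (powers.map (fun (p : Int) =>
        (((List.range n).foldl
          (fun (st : Int × Int) (i : Nat) =>
            (if PySem.Int.band (p >>> i) 1 ≠ 0 then st.1 * st.2 else st.1, st.2 * st.2))
          (1, x))).1), sqChain x n) := by
  induction n with
  | zero => simp [sqChain]
  | succ n ih =>
    simp only [List.range_succ, List.foldl_append, List.foldl_cons, List.foldl_nil]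
    rw [ih]
    refine Prod.ext ?_ ?_
    swap
    · dsimp only
      exact (sqChain_succ x n).symm
    dsimp only
    rw [zip_map_ite]
    refine List.map_congr_left (fun p _ => ?_)
    rw [pfold_snd]
    exact if_congr (cond_equiv p n) rfl rfl

-- ===== VERDICT (by name: the statement is the Claim_ definition above) =====
theorem batch_pow_spec : Claim_equal_batch_pow := by
  intro x powers _ hpre
  obtain ⟨p0, hp0, hp0n⟩ := hpre
  unfold Spec_batch_pow batch_pow batch_pow_alt
  have hne : powers ≠ [] := by rintro rfl; exact absurd hp0 List.not_mem_nil
  obtain ⟨m, hm⟩ : ∃ m, PySem.List.max? powers (fun y => y) = some m := by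
    cases h : PySem.List.max? powers (fun y => y) with
    | none => rw [PySem.List.max?_eq_none_iff] at h; exact absurd h hne
    | some m => exact ⟨m, rfl⟩
  have hmge : 0 ≤ m := le_trans hp0n (PySem.List.max?_isMax hm p0 hp0)
  rw [hm]
  dsimp only
  rcases eq_or_lt_of_le hmge with rfl | hmpos
  · simp [show PySem.Int.bitLength 0 = 0 from rfl, show ∀ p b a, bpOne p b a 0 = a from fun _ _ _ => rfl]
  · rw [if_neg (by omega), if_neg (by omega), ← nbits_eq m hmpos, swap_loops]
    dsimp only
    exact List.map_congr_left (fun p _ => (bpOne_eq_fold _ p x 1).symm)
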